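-- pv_equiv track=rewrite | github.com/pasheva/NetworkSecurity | PassCrack/password_cracker.py | leet_encrypt
-- ===== SOURCE A (Python) =====
-- def leet_encrypt(dict_pass) -> list:
--     leet_pass = []
--     for password in dict_pass:
--         #If the letter does not exist, it just ignores it.
--         leet_str = password.replace("a","4")
--         leet_str = leet_str.replace("e","3")
--         leet_str = leet_str.replace("g","6")
--         leet_str = leet_str.replace("i","1")
--         leet_str = leet_str.replace("o","0")
--         leet_str = leet_str.replace("s","5")
--         leet_str = leet_str.replace("t","7")
--         leet_pass.append(leet_str)
--     return leet_pass
-- ===== SOURCE B (Python) =====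
-- _LEET = {'a': '4', 'e': '3', 'g': '6', 'i': '1', 'o': '0', 's': '5', 't': '7'}
--
-- def leet_encrypt(dict_pass) -> list:
--     return [''.join(_LEET.get(c, c) for c in password) for password in dict_pass]
-- ===== Notes on version B (the rewrite author's own statement) =====
-- stated objective: idiomatic
-- what changed: Replaces seven sequential full-string .replace passes per password with a single character-level pass joining dict lookups over a translation table built once.
import Mathlib
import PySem

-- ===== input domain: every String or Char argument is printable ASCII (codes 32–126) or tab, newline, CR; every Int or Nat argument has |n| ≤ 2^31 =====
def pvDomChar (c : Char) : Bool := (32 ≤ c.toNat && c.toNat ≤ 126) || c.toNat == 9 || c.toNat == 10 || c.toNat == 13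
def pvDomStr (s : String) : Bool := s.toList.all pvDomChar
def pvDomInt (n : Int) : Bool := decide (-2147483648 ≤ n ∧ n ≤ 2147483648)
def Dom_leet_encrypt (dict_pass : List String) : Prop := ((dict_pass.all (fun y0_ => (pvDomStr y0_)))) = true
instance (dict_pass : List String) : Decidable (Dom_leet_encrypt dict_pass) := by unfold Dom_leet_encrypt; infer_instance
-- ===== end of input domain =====

-- B replaces seven sequential full-string .replace passes per password with one
-- character-level pass consulting a translation dict built once (idiomatic rewrite).

-- ===== PORT A =====
-- literal transliteration: the seven chained .replace calls, appended in order
def leet_encrypt (dict_pass : List String) : List String :=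
  dict_pass.foldl
    (fun leet_pass password =>
      let leet_str := PySem.Str.replace password "a" "4"
      let leet_str := PySem.Str.replace leet_str "e" "3"
      let leet_str := PySem.Str.replace leet_str "g" "6"
      let leet_str := PySem.Str.replace leet_str "i" "1"
      let leet_str := PySem.Str.replace leet_str "o" "0"
      let leet_str := PySem.Str.replace leet_str "s" "5"
      let leet_str := PySem.Str.replace leet_str "t" "7"
      leet_pass ++ [leet_str])
    []

-- ===== PORT B =====
-- the translation table _LEET, built once
def leetTable : PySem.Dict Char Char :=
  PySem.Dict.ofList [('a', '4'), ('e', '3'), ('g', '6'), ('i', '1'), ('o', '0'), ('s', '5'), ('t', '7')]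

-- ''.join(_LEET.get(c, c) for c in password) for each password
def leet_encrypt_alt (dict_pass : List String) : List String :=
  dict_pass.map (fun password =>
    String.ofList (password.toList.map (fun c => PySem.Dict.getD leetTable c c)))

-- ===== PRECONDITION & SPEC =====
def Spec_leet_encrypt (dict_pass : List String) (out : List String) : Prop := out = leet_encrypt_alt dict_pass
instance (dict_pass : List String) (out : List String) : Decidable (Spec_leet_encrypt dict_pass out) := by unfold Spec_leet_encrypt; infer_instance

-- ===== CLAIM (what is proved, stated in full; the proofs are below) =====
def Claim_equal_leet_encrypt : Prop := ∀ (dict_pass : List String), Dom_leet_encrypt dict_pass → Spec_leet_encrypt dict_pass (leet_encrypt dict_pass)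

-- ===== LEMMAS AND PROOFS =====

-- a single-character .replace is a character map
theorem go_single (a b : Char) : ∀ (fuel : Nat) (s acc : List Char), s.length ≤ fuel →
    PySem.Chars.replace.go [a] [b] fuel s acc
      = acc.reverse ++ s.map (fun c => if c = a then b else c) := by
  intro fuel
  induction fuel with
  | zero =>
    intro s acc h
    have : s = [] := List.eq_nil_of_length_eq_zero (Nat.le_zero.mp h)
    subst this
    simp [PySem.Chars.replace.go]
  | succ n ih =>
    intro s acc h
    cases s with
    | nil => simp [PySem.Chars.replace.go]
    | cons c t =>
      simp only [PySem.Chars.replace.go]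
      by_cases hc : c = a
      · subst hc
        have hp : List.isPrefixOf [c] (c :: t) = true := by
          simp [List.isPrefixOf]
        rw [if_pos hp]
        simp only [List.length_singleton, List.drop_succ_cons, List.drop_zero]
        simp only [List.length_cons] at h
        rw [ih t _ (by omega)]
        simp
      · have hp : List.isPrefixOf [a] (c :: t) = false := by
          simp [List.isPrefixOf]
          exact fun h' => hc h'.symm
        rw [if_neg (by simp [hp])]
        simp only [List.length_cons] at h
        rw [ih t _ (by omega)]
        simp [hc]

theorem replace_single (a b : Char) (s : List Char) :
    PySem.Chars.replace s [a] [b] = s.map (fun c => if c = a then b else c) := by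
  unfold PySem.Chars.replace
  simp only [List.isEmpty_cons, Bool.false_eq_true, if_false]
  exact go_single a b s.length s [] le_rfl

theorem leetTable_eq : leetTable = PySem.Dict.mk
    [('a', '4'), ('e', '3'), ('g', '6'), ('i', '1'), ('o', '0'), ('s', '5'), ('t', '7')] := by
  decide

-- per character, the seven chained substitutions agree with the table lookup
theorem chain_char (c : Char) :
    (fun c => if c = 't' then '7' else c)
      ((fun c => if c = 's' then '5' else c)
        ((fun c => if c = 'o' then '0' else c)
          ((fun c => if c = 'i' then '1' else c)
            ((fun c => if c = 'g' then '6' else c)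
              ((fun c => if c = 'e' then '3' else c)
                ((fun c => if c = 'a' then '4' else c) c))))))
      = PySem.Dict.getD leetTable c c := by
  rw [leetTable_eq]
  simp only [PySem.Dict.getD, PySem.Dict.get?_mk_cons, beq_iff_eq]
  by_cases h1 : c = 'a' <;> by_cases h2 : c = 'e' <;> by_cases h3 : c = 'g' <;>
    by_cases h4 : c = 'i' <;> by_cases h5 : c = 'o' <;> by_cases h6 : c = 's' <;>
    by_cases h7 : c = 't' <;> simp_all [PySem.Dict.get?, eq_comm]

set_option maxHeartbeats 2000000 in
theorem per_string (password : String) :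
    (PySem.Str.replace (PySem.Str.replace (PySem.Str.replace (PySem.Str.replace
      (PySem.Str.replace (PySem.Str.replace (PySem.Str.replace password "a" "4")
        "e" "3") "g" "6") "i" "1") "o" "0") "s" "5") "t" "7")
      = String.ofList (password.toList.map (fun c => PySem.Dict.getD leetTable c c)) := by
  apply String.toList_inj.mp
  simp only [PySem.Str.toList_replace, String.toList_ofList]
  rw [show ("a".toList) = ['a'] from rfl, show ("4".toList) = ['4'] from rfl,
      show ("e".toList) = ['e'] from rfl, show ("3".toList) = ['3'] from rfl,
      show ("g".toList) = ['g'] from rfl, show ("6".toList) = ['6'] from rfl,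
      show ("i".toList) = ['i'] from rfl, show ("1".toList) = ['1'] from rfl,
      show ("o".toList) = ['o'] from rfl, show ("0".toList) = ['0'] from rfl,
      show ("s".toList) = ['s'] from rfl, show ("7".toList) = ['7'] from rfl,
      show ("t".toList) = ['t'] from rfl, show ("5".toList) = ['5'] from rfl]
  rw [replace_single, replace_single, replace_single, replace_single,
      replace_single, replace_single, replace_single]
  simp only [List.map_map]
  refine List.map_congr_left (fun c _ => ?_)
  simp only [Function.comp_apply]
  exact chain_char c

-- A's append-accumulating foldl is a map
theorem foldl_append_map {α β : Type} (f : α → β) :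
    ∀ (l : List α) (acc : List β),
      l.foldl (fun a x => a ++ [f x]) acc = acc ++ l.map f := by
  intro l
  induction l with
  | nil => simp
  | cons x t ih => intro acc; simp [ih]

-- ===== VERDICT (by name: the statement is the Claim_ definition above) =====
theorem leet_encrypt_spec : Claim_equal_leet_encrypt := by
  intro dict_pass _
  unfold Spec_leet_encrypt leet_encrypt leet_encrypt_alt
  rw [foldl_append_map]
  simp only [List.nil_append]
  exact List.map_congr_left (fun password _ => per_string password)
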